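-- pv_equiv track=rewrite | github.com/pypi-data/pypi-mirror-269 | packages/opentf-toolkit-nightly/opentf_toolkit_nightly-0.55.0.dev941-py3-none-any.whl/opentf/commons/datasources.py | _evaluate_test_results
-- ===== SOURCE A (Python) =====
-- from typing import Any, Dict, Generator, List, Optional, Set
--
-- SUCCESS = 'SUCCESS'
--
-- FAILURE = 'FAILURE'
--
-- ERROR = 'ERROR'
--
-- SKIPPED = 'SKIPPED'
--
-- TOTAL = 'total count'
--
-- STATUSES_ORDER = (SUCCESS, FAILURE, ERROR, SKIPPED)
--
-- def _get_sum_for_status(testcases: Dict[str, Any], status: str) -> int: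
--     return sum(1 for testcase in testcases.values() if testcase['status'] == status)
--
-- def _evaluate_test_results(jobs_testcases: Dict[str, Any]) -> Dict[str, Any]:
--     """Summarize job testcases.
--
--     # Returned value
--
--     A dictionary with one entry per job (a dictionary with keys being
--     statuses and values being counts).
--     """
--     summaries = {}
--     for job, testcases in jobs_testcases.items():
--         successes, failures, errors, skipped = [
--             _get_sum_for_status(testcases, status) for status in STATUSES_ORDER
--         ]
--         summaries[job] = {
--             SUCCESS: successes,
--             FAILURE: failures,
--             ERROR: errors,
--             SKIPPED: skipped,
--             TOTAL: len(testcases),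
--         }
--     return summaries
-- ===== SOURCE B (Python) =====
-- SUCCESS = 'SUCCESS'
-- FAILURE = 'FAILURE'
-- ERROR = 'ERROR'
-- SKIPPED = 'SKIPPED'
-- TOTAL = 'total count'
--
--
-- def _evaluate_test_results(jobs_testcases):
--     """One pass per job with four counters instead of four scans per job."""
--     summaries = {}
--     for job, testcases in jobs_testcases.items():
--         successes = failures = errors = skipped = 0
--         for testcase in testcases.values():
--             status = testcase['status']
--             if status == SUCCESS:
--                 successes += 1
--             elif status == FAILURE:
--                 failures += 1
--             elif status == ERROR:
--                 errors += 1
--             elif status == SKIPPED: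
--                 skipped += 1
--         summaries[job] = {
--             SUCCESS: successes,
--             FAILURE: failures,
--             ERROR: errors,
--             SKIPPED: skipped,
--             TOTAL: len(testcases),
--         }
--     return summaries
-- ===== Notes on version B (the rewrite author's own statement) =====
-- stated objective: simpler
-- what changed: Replaces the four separate per-status scans of each job's testcases with a single pass keeping four counters (if/elif chain), then emits the same summary dict.
import Mathlib
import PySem

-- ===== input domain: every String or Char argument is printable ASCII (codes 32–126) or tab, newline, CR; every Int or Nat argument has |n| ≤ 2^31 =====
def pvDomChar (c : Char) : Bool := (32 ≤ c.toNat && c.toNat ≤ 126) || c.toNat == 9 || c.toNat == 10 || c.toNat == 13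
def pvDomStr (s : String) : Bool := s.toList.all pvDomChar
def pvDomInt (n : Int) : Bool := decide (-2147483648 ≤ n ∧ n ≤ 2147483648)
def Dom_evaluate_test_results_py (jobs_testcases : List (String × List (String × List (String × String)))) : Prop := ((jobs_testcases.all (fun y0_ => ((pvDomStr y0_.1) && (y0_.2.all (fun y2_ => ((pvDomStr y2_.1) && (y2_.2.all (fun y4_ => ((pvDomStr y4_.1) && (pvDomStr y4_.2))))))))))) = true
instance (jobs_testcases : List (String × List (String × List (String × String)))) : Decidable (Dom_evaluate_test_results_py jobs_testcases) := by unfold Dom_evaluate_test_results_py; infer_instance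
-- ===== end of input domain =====

-- B changes: one pass with four counters per job instead of four separate scans; same summaries.

-- ===== PORT A =====
-- testcase['status'] on the dict a testcase's assoc list denotes (none = KeyError, excluded by Pre_)
def statusOf_py (tc : List (String × String)) : Option String :=
  (PySem.Dict.ofList tc).get? "status"

-- sum(1 for testcase in testcases.values() if testcase['status'] == status)
def get_sum_for_status_py (testcases : PySem.Dict String (List (String × String))) (status : String) : Int :=
  testcases.values.foldl (fun acc tc => if statusOf_py tc == some status then acc + 1 else acc) 0

-- summaries[job] = {SUCCESS: …, FAILURE: …, ERROR: …, SKIPPED: …, TOTAL: len(testcases)}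
def job_summary_a (testcases : PySem.Dict String (List (String × String))) : List (String × Int) :=
  [("SUCCESS", get_sum_for_status_py testcases "SUCCESS"),
   ("FAILURE", get_sum_for_status_py testcases "FAILURE"),
   ("ERROR", get_sum_for_status_py testcases "ERROR"),
   ("SKIPPED", get_sum_for_status_py testcases "SKIPPED"),
   ("total count", (testcases.size : Int))]

def evaluate_test_results_py (jobs_testcases : List (String × List (String × List (String × String)))) : List (String × List (String × Int)) :=
  ((PySem.Dict.ofList jobs_testcases).items.foldl
    (fun (summaries : PySem.Dict String (List (String × Int))) jt =>
      summaries.insert jt.1 (job_summary_a (PySem.Dict.ofList jt.2)))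
    PySem.Dict.empty).items

-- ===== PORT B =====
-- the single counting pass: if/elif chain over the four statuses (none = KeyError, excluded by Pre_)
def count_statuses_b (vals : List (List (String × String))) (acc : Int × Int × Int × Int) : Int × Int × Int × Int :=
  vals.foldl (fun a tc =>
    match statusOf_py tc with
    | none => a
    | some st =>
      if st == "SUCCESS" then (a.1 + 1, a.2.1, a.2.2.1, a.2.2.2)
      else if st == "FAILURE" then (a.1, a.2.1 + 1, a.2.2.1, a.2.2.2)
      else if st == "ERROR" then (a.1, a.2.1, a.2.2.1 + 1, a.2.2.2)
      else if st == "SKIPPED" then (a.1, a.2.1, a.2.2.1, a.2.2.2 + 1)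
      else a) acc

def job_summary_b (testcases : PySem.Dict String (List (String × String))) : List (String × Int) :=
  let c := count_statuses_b testcases.values (0, 0, 0, 0)
  [("SUCCESS", c.1), ("FAILURE", c.2.1), ("ERROR", c.2.2.1), ("SKIPPED", c.2.2.2),
   ("total count", (testcases.size : Int))]

def evaluate_test_results_py_alt (jobs_testcases : List (String × List (String × List (String × String)))) : List (String × List (String × Int)) :=
  ((PySem.Dict.ofList jobs_testcases).items.foldl
    (fun (summaries : PySem.Dict String (List (String × Int))) jt =>
      summaries.insert jt.1 (job_summary_b (PySem.Dict.ofList jt.2)))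
    PySem.Dict.empty).items

-- ===== PRECONDITION & SPEC =====
-- Pre_ excludes inputs where some testcase actually present in the dicts lacks a 'status' key:
-- there both Pythons raise KeyError.
def Pre_evaluate_test_results_py (jobs_testcases : List (String × List (String × List (String × String)))) : Prop :=
  ((PySem.Dict.ofList jobs_testcases).values.all (fun tcs =>
    (PySem.Dict.ofList tcs).values.all (fun tc =>
      tc.any (fun kv => kv.1 == "status")))) = true
instance (jobs_testcases : List (String × List (String × List (String × String)))) : Decidable (Pre_evaluate_test_results_py jobs_testcases) := by unfold Pre_evaluate_test_results_py; infer_instance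

def pvWitness_evaluate_test_results_py : (List (String × List (String × List (String × String)))) :=
  [("job1", [("tc1", [("status", "SUCCESS")]), ("tc2", [("status", "FAILURE")])]), ("job2", [])]

def Spec_evaluate_test_results_py (jobs_testcases : List (String × List (String × List (String × String)))) (out : List (String × List (String × Int))) : Prop := out = evaluate_test_results_py_alt jobs_testcases
instance (jobs_testcases : List (String × List (String × List (String × String)))) (out : List (String × List (String × Int))) : Decidable (Spec_evaluate_test_results_py jobs_testcases out) := by unfold Spec_evaluate_test_results_py; infer_instance

-- ===== CLAIM (what is proved, stated in full; the proofs are below) =====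
def Claim_equal_evaluate_test_results_py : Prop := ∀ (jobs_testcases : List (String × List (String × List (String × String)))), Dom_evaluate_test_results_py jobs_testcases → Pre_evaluate_test_results_py jobs_testcases → Spec_evaluate_test_results_py jobs_testcases (evaluate_test_results_py jobs_testcases)

-- ===== LEMMAS AND PROOFS =====

-- shifting the accumulator out of A's counting fold
lemma get_sum_acc (status : String) (vals : List (List (String × String))) (a : Int) :
    vals.foldl (fun acc tc => if statusOf_py tc == some status then acc + 1 else acc) a
      = a + vals.foldl (fun acc tc => if statusOf_py tc == some status then acc + 1 else acc) 0 := by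
  induction vals generalizing a with
  | nil => simp
  | cons tc rest ih =>
    simp only [List.foldl_cons]
    rw [ih, ih (if statusOf_py tc == some status then 0 + 1 else 0)]
    split <;> ring

-- B's one-pass tuple fold computes A's four counts
lemma count_statuses_eq (vals : List (List (String × String))) (s f e k : Int) :
    count_statuses_b vals (s, f, e, k)
      = (s + vals.foldl (fun acc tc => if statusOf_py tc == some "SUCCESS" then acc + 1 else acc) 0,
         f + vals.foldl (fun acc tc => if statusOf_py tc == some "FAILURE" then acc + 1 else acc) 0,
         e + vals.foldl (fun acc tc => if statusOf_py tc == some "ERROR" then acc + 1 else acc) 0,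
         k + vals.foldl (fun acc tc => if statusOf_py tc == some "SKIPPED" then acc + 1 else acc) 0) := by
  induction vals generalizing s f e k with
  | nil => simp [count_statuses_b]
  | cons tc rest ih =>
    have hc : ∀ status : String,
        (tc :: rest).foldl (fun acc tc => if statusOf_py tc == some status then acc + 1 else acc) 0
          = (if statusOf_py tc == some status then (1 : Int) else 0)
            + rest.foldl (fun acc tc => if statusOf_py tc == some status then acc + 1 else acc) 0 := by
      intro status
      simp only [List.foldl_cons]
      rw [get_sum_acc]
      split <;> ring
    have hstep : count_statuses_b (tc :: rest) (s, f, e, k)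
        = count_statuses_b rest (match statusOf_py tc with
          | none => (s, f, e, k)
          | some st =>
            if st == "SUCCESS" then (s + 1, f, e, k)
            else if st == "FAILURE" then (s, f + 1, e, k)
            else if st == "ERROR" then (s, f, e + 1, k)
            else if st == "SKIPPED" then (s, f, e, k + 1)
            else (s, f, e, k)) := rfl
    rw [hstep]
    simp only [hc]
    rcases hst : statusOf_py tc with _ | st
    · rw [ih]
      simp [hst]
    · by_cases hS : st = "SUCCESS"
      · subst hS; rw [ih]; simp [hst, Prod.ext_iff] <;> ring
      · by_cases hF : st = "FAILURE"
        · subst hF; simp only [hst, beq_iff_eq, Option.some.injEq]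
          rw [if_neg (by decide), if_pos (by trivial), ih]
          simp [Prod.ext_iff] <;> try ring
        · by_cases hE : st = "ERROR"
          · subst hE; simp only [hst, beq_iff_eq, Option.some.injEq]
            rw [if_neg (by decide), if_neg (by decide), if_pos (by trivial), ih]
            simp [Prod.ext_iff] <;> try ring
          · by_cases hK : st = "SKIPPED"
            · subst hK; simp only [hst, beq_iff_eq, Option.some.injEq]
              rw [if_neg (by decide), if_neg (by decide), if_neg (by decide), if_pos (by trivial), ih]
              simp [Prod.ext_iff] <;> try ring
            · simp only [hst, beq_iff_eq, Option.some.injEq]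
              rw [if_neg hS, if_neg hF, if_neg hE, if_neg hK, ih]
              simp [hS, hF, hE, hK]

lemma job_summary_eq (testcases : PySem.Dict String (List (String × String))) :
    job_summary_a testcases = job_summary_b testcases := by
  simp [job_summary_a, job_summary_b, get_sum_for_status_py, count_statuses_eq]

-- ===== VERDICT (by name: the statement is the Claim_ definition above) =====
theorem evaluate_test_results_py_spec : Claim_equal_evaluate_test_results_py := by
  intro jobs _ _
  unfold Spec_evaluate_test_results_py evaluate_test_results_py evaluate_test_results_py_alt
  rw [show (fun (summaries : PySem.Dict String (List (String × Int))) jt =>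
        summaries.insert jt.1 (job_summary_a (PySem.Dict.ofList jt.2)))
      = (fun (summaries : PySem.Dict String (List (String × Int)))
            (jt : String × List (String × List (String × String))) =>
        summaries.insert jt.1 (job_summary_b (PySem.Dict.ofList jt.2)))
    from funext fun _ => funext fun jt => by rw [job_summary_eq]]
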